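-- pv_equiv track=rewrite | github.com/ghostdev137/ford-pscm-re | tools/rh850_disasm/recursive_disasm.py | build_functions
-- ===== SOURCE A (Python) =====
-- BIN_END_VA = 0x01100000       # 1 MB strategy block
--
-- def build_functions(visited, entries):
--     """Split visited addresses into per-function listings using entry set."""
--     sorted_entries = sorted(e for e in entries if e in visited)
--     funcs = {}
--     for i, ep in enumerate(sorted_entries):
--         next_ep = sorted_entries[i+1] if i+1 < len(sorted_entries) else BIN_END_VA
--         addrs = sorted(a for a in visited if ep <= a < next_ep)
--         if not addrs: continue
--         funcs[ep] = addrs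
--     return funcs
-- ===== SOURCE B (Python) =====
-- BIN_END_VA = 0x01100000       # 1 MB strategy block
--
-- def build_functions(visited, entries):
--     """Split visited addresses into per-function listings using entry set.
--
--     Sorts visited once and sweeps it left-to-right with a pointer kept at the
--     end of a descending copy (pop() = smallest remaining), assigning each
--     address to its entry bucket in one pass."""
--     vset = set(visited)
--     eps = sorted({e for e in entries if e in vset})
--     rest = sorted(visited, reverse=True)   # ascending when read from the end
--     funcs = {}
--     for ep, nxt in zip(eps, eps[1:] + [BIN_END_VA]):
--         while rest and rest[-1] < ep:
--             rest.pop()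
--         chunk = []
--         while rest and rest[-1] < nxt:
--             chunk.append(rest.pop())
--         if chunk:
--             funcs[ep] = chunk
--     return funcs
-- ===== Notes on version B (the rewrite author's own statement) =====
-- stated objective: faster
-- what changed: Instead of re-filtering and re-sorting the whole visited list once per entry, B sorts visited once and deduplicates/sorts the in-visited entries once, then assigns addresses to entry buckets in a single merge-style sweep with a pointer.
import Mathlib
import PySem

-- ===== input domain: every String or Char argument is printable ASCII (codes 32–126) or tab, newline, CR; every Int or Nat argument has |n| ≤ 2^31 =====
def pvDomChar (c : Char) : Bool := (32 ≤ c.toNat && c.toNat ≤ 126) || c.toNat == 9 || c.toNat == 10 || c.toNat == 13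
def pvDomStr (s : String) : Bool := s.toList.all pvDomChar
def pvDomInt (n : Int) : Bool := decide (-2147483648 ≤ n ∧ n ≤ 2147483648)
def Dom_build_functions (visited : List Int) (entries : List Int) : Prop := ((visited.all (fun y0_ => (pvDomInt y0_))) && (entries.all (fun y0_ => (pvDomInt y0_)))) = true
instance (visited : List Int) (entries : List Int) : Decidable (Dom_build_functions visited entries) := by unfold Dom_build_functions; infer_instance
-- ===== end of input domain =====

-- B replaces A's per-entry filter+sort of visited (O(E·V log V)) by one sort of visited
-- and one sorted deduplication of the entries, then a single merge-style sweep.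

-- ===== PORT A =====
def BIN_END_VA : Int := 0x01100000

def build_functions (visited : List Int) (entries : List Int) : List (Int × List Int) :=
  let sorted_entries := PySem.List.sorted (entries.filter (fun e => visited.contains e)) (fun x => x) false
  let funcs := (PySem.List.enumerate sorted_entries).foldl
    (fun (funcs : PySem.Dict Int (List Int)) p =>
      let next_ep : Int :=
        if p.1 + 1 < (sorted_entries.length : Int)
        then PySem.List.pyGetD sorted_entries (p.1 + 1) 0 else BIN_END_VA
      let addrs := PySem.List.sorted
        (visited.filter (fun a => decide (p.2 ≤ a) && decide (a < next_ep))) (fun x => x) false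
      if addrs = [] then funcs else funcs.insert p.2 addrs)
    PySem.Dict.empty
  funcs.items

-- ===== PORT B =====
-- 'while rest and rest[-1] < b: rest.pop()' — Python keeps rest DESCENDING and pops its
-- last (= smallest) element in O(1); the port holds the same sequence ASCENDING and
-- consumes it from the head, which is exactly the same sequence of popped values.
def skipLT (b : Int) : List Int → List Int
  | [] => []
  | x :: xs => if x < b then skipLT b xs else x :: xs

-- 'while rest and rest[-1] < b: chunk.append(rest.pop())' — returns (chunk, rest-after).
def takeLT (b : Int) : List Int → List Int × List Int
  | [] => ([], [])
  | x :: xs => if x < b then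
      let r := takeLT b xs
      (x :: r.1, r.2)
    else ([], x :: xs)

def build_functions_alt (visited : List Int) (entries : List Int) : List (Int × List Int) :=
  let vset := PySem.Set.ofList visited
  let eps := PySem.List.sorted
    (PySem.Set.ofList (entries.filter (fun e => PySem.Set.contains vset e))) (fun x => x) false
  let rest0 := PySem.List.sorted visited (fun x => x) false
  let funcs := ((eps.zip (eps.tail ++ [BIN_END_VA])).foldl
    (fun (st : PySem.Dict Int (List Int) × List Int) p =>
      let rest := skipLT p.1 st.2
      let ck := takeLT p.2 rest
      (if ck.1 = [] then st.1 else st.1.insert p.1 ck.1, ck.2))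
    (PySem.Dict.empty, rest0)).1
  funcs.items

-- ===== PRECONDITION & SPEC =====
def Spec_build_functions (visited : List Int) (entries : List Int) (out : List (Int × List Int)) : Prop := out = build_functions_alt visited entries
instance (visited : List Int) (entries : List Int) (out : List (Int × List Int)) : Decidable (Spec_build_functions visited entries out) := by unfold Spec_build_functions; infer_instance

-- ===== CLAIM (what is proved, stated in full; the proofs are below) =====
def Claim_equal_build_functions : Prop := ∀ (visited : List Int) (entries : List Int), Dom_build_functions visited entries → Spec_build_functions visited entries (build_functions visited entries)

-- ===== LEMMAS AND PROOFS =====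

-- canonical result: per strictly-increasing entry list, the chunk of sorted-visited in [ep, nxt)
def canon (sv : List Int) : List Int → List (Int × List Int)
  | [] => []
  | ep :: eps =>
    let nxt := eps.headD BIN_END_VA
    let chunk := sv.filter (fun a => decide (ep ≤ a) && decide (a < nxt))
    (if chunk = [] then [] else [(ep, chunk)]) ++ canon sv eps

lemma skipLT_eq_filter (b : Int) (l : List Int) (hl : l.Pairwise (· ≤ ·)) :
    skipLT b l = l.filter (fun a => decide (b ≤ a)) := by
  induction l with
  | nil => rfl
  | cons x xs ih =>
    rcases List.pairwise_cons.mp hl with ⟨hx, hxs⟩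
    by_cases h : x < b
    · simp [skipLT, h, ih hxs]
    · simp only [skipLT, if_neg h]
      symm
      refine List.filter_eq_self.mpr ?_
      intro a ha
      rcases List.mem_cons.mp ha with rfl | ha
      · simpa using by omega
      · have := hx a ha; simpa using by omega

lemma takeLT_eq_filter (b : Int) (l : List Int) (hl : l.Pairwise (· ≤ ·)) :
    takeLT b l = (l.filter (fun a => decide (a < b)), l.filter (fun a => decide (b ≤ a))) := by
  induction l with
  | nil => rfl
  | cons x xs ih =>
    rcases List.pairwise_cons.mp hl with ⟨hx, hxs⟩
    by_cases h : x < b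
    · simp [takeLT, h, ih hxs]
    · simp only [takeLT, if_neg h, Prod.mk.injEq]
      constructor
      · symm
        refine List.filter_eq_nil_iff.mpr ?_
        intro a ha
        rcases List.mem_cons.mp ha with rfl | ha
        · simpa using by omega
        · have := hx a ha; simpa using by omega
      · symm
        refine List.filter_eq_self.mpr ?_
        intro a ha
        rcases List.mem_cons.mp ha with rfl | ha
        · simpa using by omega
        · have := hx a ha; simpa using by omega

-- stable sort commutes with filter
lemma sorted_filter (p : Int → Bool) (xs : List Int) :
    PySem.List.sorted (xs.filter p) (fun x => x) false
      = (PySem.List.sorted xs (fun x => x) false).filter p := by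
  exact PySem.List.sorted_id_eq_of_perm_of_pairwise _ _
    ((PySem.List.sorted_perm xs (fun x => x) false).filter p)
    ((PySem.List.sorted_pairwise xs (fun x => x)).filter p)

-- two ≤-sorted lists with the same members have the same head
lemma headD_eq_of_mem_iff (l1 l2 : List Int) (d : Int) (h1 : l1.Pairwise (· ≤ ·))
    (h2 : l2.Pairwise (· ≤ ·)) (hm : ∀ x, x ∈ l1 ↔ x ∈ l2) : l1.headD d = l2.headD d := by
  match l1, l2 with
  | [], [] => rfl
  | [], y :: l2 => exact absurd ((hm y).mpr (List.mem_cons_self)) (List.not_mem_nil)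
  | x :: l1, [] => exact absurd ((hm x).mp (List.mem_cons_self)) (List.not_mem_nil)
  | x :: l1, y :: l2 =>
    have hyx : y ≤ x := by
      rcases List.mem_cons.mp ((hm x).mp List.mem_cons_self) with h | h
      · omega
      · exact (List.pairwise_cons.mp h2).1 x h
    have hxy : x ≤ y := by
      rcases List.mem_cons.mp ((hm y).mpr List.mem_cons_self) with h | h
      · omega
      · exact (List.pairwise_cons.mp h1).1 y h
    simp only [List.headD_cons]
    omega

-- A's enumerate-with-index-lookahead loop is the fold over consecutive pairs
lemma enum_zip {σ : Type} (l : List Int) (f : σ → Int → Int → σ) (E : Int) :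
    ∀ (t : List Int) (n : Nat) (init : σ), t = l.drop n →
    (PySem.List.enumerate t (n : Int)).foldl
        (fun s p => f s p.2
          (if p.1 + 1 < (l.length : Int) then PySem.List.pyGetD l (p.1 + 1) 0 else E)) init
      = (t.zip (t.tail ++ [E])).foldl (fun s p => f s p.1 p.2) init := by
  intro t
  induction t with
  | nil => intro n init ht; rfl
  | cons x xs ih =>
    intro n init ht
    have hxs : xs = l.drop (n + 1) := by rw [← List.tail_drop, ← ht]; rfl
    have hcast : (n : Int) + 1 = ((n + 1 : Nat) : Int) := by push_cast; ring
    have hnxt : (if (n : Int) + 1 < (l.length : Int) then PySem.List.pyGetD l ((n : Int) + 1) 0 else E)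
        = xs.headD E := by
      cases hx : xs with
      | nil =>
        have hle : l.length ≤ n + 1 := List.drop_eq_nil_iff.mp (by rw [← hxs, hx])
        rw [if_neg (by exact_mod_cast Nat.not_lt.mpr hle)]
        rfl
      | cons y ys =>
        have hne : l.drop (n + 1) ≠ [] := by rw [← hxs, hx]; simp
        have hlt : n + 1 < l.length := by
          rcases Nat.lt_or_ge (n + 1) l.length with h | h
          · exact h
          · exact absurd (List.drop_eq_nil_iff.mpr h) hne
        rw [if_pos (by exact_mod_cast hlt), hcast, PySem.List.pyGetD_natCast]
        have hy : l[n + 1]? = some y := by rw [← List.head?_drop, ← hxs, hx]; rfl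
        rw [List.getD_eq_getElem?_getD, hy]
        rfl
    rw [PySem.List.enumerate_cons, List.foldl_cons]
    simp only []
    rw [hnxt, hcast, ih (n + 1) _ hxs]
    cases xs with
    | nil => rfl
    | cons y ys => rfl

-- A's pair-fold over the (possibly duplicated) ≤-sorted entry list produces canon of the
-- strictly increasing list with the same members
lemma A_loop (visited : List Int) :
    ∀ (se eps : List Int) (funcs : PySem.Dict Int (List Int)),
    se.Pairwise (· ≤ ·) → eps.Pairwise (· < ·) → (∀ x, x ∈ eps ↔ x ∈ se) →
    (∀ k, funcs.contains k = true → ∀ e ∈ se, k < e) →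
    ((se.zip (se.tail ++ [BIN_END_VA])).foldl
      (fun (funcs : PySem.Dict Int (List Int)) p =>
        let addrs := PySem.List.sorted
          (visited.filter (fun a => decide (p.1 ≤ a) && decide (a < p.2))) (fun x => x) false
        if addrs = [] then funcs else funcs.insert p.1 addrs) funcs).items
      = funcs.items ++ canon (PySem.List.sorted visited (fun x => x) false) eps := by
  intro se
  induction se with
  | nil =>
    intro eps funcs _ _ hmem _
    have heps : eps = [] :=
      List.eq_nil_iff_forall_not_mem.mpr (fun x hx => by simpa using (hmem x).mp hx)
    subst heps
    simp [canon]
  | cons ep rest ih =>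
    intro eps funcs hse heps hmem hfresh
    rcases List.pairwise_cons.mp hse with ⟨hep_le, hrest⟩
    have hzip : (ep :: rest).zip ((ep :: rest).tail ++ [BIN_END_VA])
        = (ep, rest.headD BIN_END_VA) :: rest.zip (rest.tail ++ [BIN_END_VA]) := by
      cases rest <;> rfl
    rw [hzip, List.foldl_cons]
    simp only []
    by_cases hdup : ep ∈ rest
    · -- duplicated entry: its range [ep, ep) is empty, the iteration is a no-op
      have hhead : rest.headD BIN_END_VA = ep := by
        cases hr : rest with
        | nil => rw [hr] at hdup; exact absurd hdup List.not_mem_nil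
        | cons r rs =>
          have h1 : ep ≤ r := hep_le r (by rw [hr]; exact List.mem_cons_self)
          have h2 : r ≤ ep := by
            rcases List.mem_cons.mp (hr ▸ hdup) with h | h
            · omega
            · exact (List.pairwise_cons.mp (hr ▸ hrest)).1 ep h
          simp only [List.headD_cons]; omega
      have hfilter : visited.filter
          (fun a => decide (ep ≤ a) && decide (a < rest.headD BIN_END_VA)) = [] := by
        rw [hhead]
        exact List.filter_eq_nil_iff.mpr (fun a _ => by simp)
      rw [hfilter]
      rw [if_pos ((PySem.List.sorted_eq_nil_iff _ _ _).mpr rfl)]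
      refine ih eps funcs hrest heps (fun x => ?_) (fun k hk e he => hfresh k hk e (List.mem_cons_of_mem ep he))
      constructor
      · intro hx
        rcases List.mem_cons.mp ((hmem x).mp hx) with rfl | h
        · exact hdup
        · exact h
      · intro hx
        exact (hmem x).mpr (List.mem_cons_of_mem ep hx)
    · -- fresh entry: it heads eps as well
      obtain ⟨e0, es, rfl⟩ : ∃ e0 es, eps = e0 :: es := by
        cases heq : eps with
        | nil =>
          have := (hmem ep).mpr List.mem_cons_self
          rw [heq] at this
          exact absurd this List.not_mem_nil
        | cons a b => exact ⟨a, b, rfl⟩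
      have he0ep : e0 = ep := by
        have h1 : ep ≤ e0 := by
          rcases List.mem_cons.mp ((hmem e0).mp List.mem_cons_self) with rfl | h
          · omega
          · exact hep_le e0 h
        rcases List.mem_cons.mp ((hmem ep).mpr List.mem_cons_self) with h | h
        · omega
        · have := (List.pairwise_cons.mp heps).1 ep h
          omega
      subst he0ep
      have hmem' : ∀ x, x ∈ es ↔ x ∈ rest := by
        intro x
        constructor
        · intro hx
          have hlt := (List.pairwise_cons.mp heps).1 x hx
          rcases List.mem_cons.mp ((hmem x).mp (List.mem_cons_of_mem e0 hx)) with rfl | h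
          · omega
          · exact h
        · intro hx
          have hne : x ≠ e0 := fun h => hdup (h ▸ hx)
          rcases List.mem_cons.mp ((hmem x).mpr (List.mem_cons_of_mem e0 hx)) with h | h
          · exact absurd h hne
          · exact h
      have hnxt : rest.headD BIN_END_VA = es.headD BIN_END_VA :=
        headD_eq_of_mem_iff rest es _ hrest
          ((List.pairwise_cons.mp heps).2.imp le_of_lt) (fun x => (hmem' x).symm)
      rw [sorted_filter, hnxt]
      have hfresh_tail : ∀ k, funcs.contains k = true → ∀ e ∈ rest, k < e :=
        fun k hk e he => hfresh k hk e (List.mem_cons_of_mem e0 he)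
      have hes_pw := (List.pairwise_cons.mp heps).2
      by_cases hchunk : (PySem.List.sorted visited (fun x => x) false).filter
          (fun a => decide (e0 ≤ a) && decide (a < es.headD BIN_END_VA)) = []
      · rw [if_pos hchunk]
        rw [ih es funcs hrest hes_pw hmem' hfresh_tail]
        simp only [canon]
        rw [if_pos hchunk]
        rfl
      · rw [if_neg hchunk]
        have hnc : funcs.contains e0 = false := by
          cases h : funcs.contains e0
          · rfl
          · exact absurd (hfresh e0 h e0 List.mem_cons_self) (lt_irrefl e0)
        have hfresh' : ∀ k, (funcs.insert e0 ((PySem.List.sorted visited (fun x => x) false).filter (fun a => decide (e0 ≤ a) && decide (a < es.headD BIN_END_VA)))).contains k = true → ∀ e ∈ rest, k < e := by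
          intro k hk e he
          rw [PySem.Dict.contains_insert] at hk
          rcases Bool.or_eq_true_iff.mp hk with h | h
          · have : k = e0 := eq_of_beq h
            subst this
            have h1 := hep_le e he
            have h2 : e ≠ k := fun hh => hdup (hh ▸ he)
            omega
          · exact hfresh_tail k h e he
        rw [ih es (funcs.insert e0 ((PySem.List.sorted visited (fun x => x) false).filter (fun a => decide (e0 ≤ a) && decide (a < es.headD BIN_END_VA)))) hrest hes_pw hmem' hfresh']
        rw [PySem.Dict.items_insert_of_not_contains funcs _ hnc]
        simp only [canon]
        rw [if_neg hchunk]
        simp [List.append_assoc]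

-- B's sweep over the strictly increasing entry list produces canon
lemma B_loop (sv : List Int) (hsv : sv.Pairwise (· ≤ ·)) :
    ∀ (eps : List Int) (funcs : PySem.Dict Int (List Int)) (r : List Int),
    eps.Pairwise (· < ·) → r.Pairwise (· ≤ ·) →
    (∀ e ∈ eps, r.filter (fun a => decide (e ≤ a)) = sv.filter (fun a => decide (e ≤ a))) →
    (∀ k, funcs.contains k = true → ∀ e ∈ eps, k < e) →
    (((eps.zip (eps.tail ++ [BIN_END_VA])).foldl
      (fun (st : PySem.Dict Int (List Int) × List Int) p =>
        let rest := skipLT p.1 st.2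
        let ck := takeLT p.2 rest
        (if ck.1 = [] then st.1 else st.1.insert p.1 ck.1, ck.2))
      (funcs, r)).1).items
      = funcs.items ++ canon sv eps := by
  intro eps
  induction eps with
  | nil =>
    intro funcs r _ _ _ _
    simp [canon]
  | cons ep es ih =>
    intro funcs r heps hr hfilt hfresh
    rcases List.pairwise_cons.mp heps with ⟨hep_lt, hes⟩
    have hzip : (ep :: es).zip ((ep :: es).tail ++ [BIN_END_VA])
        = (ep, es.headD BIN_END_VA) :: es.zip (es.tail ++ [BIN_END_VA]) := by
      cases es <;> rfl
    rw [hzip, List.foldl_cons]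
    simp only []
    have h1 : skipLT ep r = sv.filter (fun a => decide (ep ≤ a)) := by
      rw [skipLT_eq_filter ep r hr]
      exact hfilt ep List.mem_cons_self
    have hsort1 : (sv.filter (fun a => decide (ep ≤ a))).Pairwise (· ≤ ·) := hsv.filter _
    rw [h1, takeLT_eq_filter _ _ hsort1]
    simp only []
    have hchunk_eq : (sv.filter (fun a => decide (ep ≤ a))).filter
          (fun a => decide (a < es.headD BIN_END_VA))
        = sv.filter (fun a => decide (ep ≤ a) && decide (a < es.headD BIN_END_VA)) := by
      rw [List.filter_filter]
      exact List.filter_congr (fun x _ => Bool.and_comm _ _)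
    rw [hchunk_eq]
    have hnxt_le : ∀ e ∈ es, es.headD BIN_END_VA ≤ e := by
      intro e he
      cases hes' : es with
      | nil => rw [hes'] at he; exact absurd he List.not_mem_nil
      | cons h hs =>
        rcases List.mem_cons.mp (hes' ▸ he) with rfl | hmem
        · simp
        · have := (List.pairwise_cons.mp (hes' ▸ hes)).1 e hmem
          simp only [List.headD_cons]
          omega
    have hr2 : ((sv.filter (fun a => decide (ep ≤ a))).filter
        (fun a => decide (es.headD BIN_END_VA ≤ a))).Pairwise (· ≤ ·) := hsort1.filter _
    have hfilt' : ∀ e ∈ es, ((sv.filter (fun a => decide (ep ≤ a))).filter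
          (fun a => decide (es.headD BIN_END_VA ≤ a))).filter (fun a => decide (e ≤ a))
        = sv.filter (fun a => decide (e ≤ a)) := by
      intro e he
      rw [List.filter_filter, List.filter_filter]
      refine List.filter_congr (fun x _ => ?_)
      have h1 := hnxt_le e he
      have h2 := hep_lt e he
      by_cases hx : e ≤ x
      · simp only [decide_eq_true (by omega : es.headD BIN_END_VA ≤ x),
          decide_eq_true (by omega : ep ≤ x), decide_eq_true hx, Bool.and_self]
      · simp [hx]
    by_cases hchunk : sv.filter
        (fun a => decide (ep ≤ a) && decide (a < es.headD BIN_END_VA)) = []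
    · rw [if_pos hchunk]
      rw [ih funcs _ hes hr2 hfilt' (fun k hk e he => hfresh k hk e (List.mem_cons_of_mem ep he))]
      simp only [canon]
      rw [if_pos hchunk]
      rfl
    · rw [if_neg hchunk]
      have hnc : funcs.contains ep = false := by
        cases h : funcs.contains ep
        · rfl
        · exact absurd (hfresh ep h ep List.mem_cons_self) (lt_irrefl ep)
      have hfresh' : ∀ k, (funcs.insert ep (sv.filter
            (fun a => decide (ep ≤ a) && decide (a < es.headD BIN_END_VA)))).contains k = true →
          ∀ e ∈ es, k < e := by
        intro k hk e he
        rw [PySem.Dict.contains_insert] at hk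
        rcases Bool.or_eq_true_iff.mp hk with h | h
        · have : k = ep := eq_of_beq h
          subst this
          exact hep_lt e he
        · exact hfresh k h e (List.mem_cons_of_mem ep he)
      rw [ih (funcs.insert ep (sv.filter
            (fun a => decide (ep ≤ a) && decide (a < es.headD BIN_END_VA)))) _ hes hr2 hfilt' hfresh']
      rw [PySem.Dict.items_insert_of_not_contains funcs _ hnc]
      simp only [canon]
      rw [if_neg hchunk]
      simp [List.append_assoc]

-- ===== VERDICT (by name: the statement is the Claim_ definition above) =====
lemma dict_empty_contains (k : Int) :
    (PySem.Dict.empty : PySem.Dict Int (List Int)).contains k = false := rfl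

-- A's enumerate loop with the index lookahead, re-read as a fold over consecutive pairs
lemma A_enum_eq_zip (visited se : List Int) (funcs : PySem.Dict Int (List Int)) :
    (PySem.List.enumerate se).foldl
      (fun (funcs : PySem.Dict Int (List Int)) p =>
        let next_ep : Int :=
          if p.1 + 1 < (se.length : Int)
          then PySem.List.pyGetD se (p.1 + 1) 0 else BIN_END_VA
        let addrs := PySem.List.sorted
          (visited.filter (fun a => decide (p.2 ≤ a) && decide (a < next_ep))) (fun x => x) false
        if addrs = [] then funcs else funcs.insert p.2 addrs) funcs
    = (se.zip (se.tail ++ [BIN_END_VA])).foldl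
      (fun (funcs : PySem.Dict Int (List Int)) p =>
        let addrs := PySem.List.sorted
          (visited.filter (fun a => decide (p.1 ≤ a) && decide (a < p.2))) (fun x => x) false
        if addrs = [] then funcs else funcs.insert p.1 addrs) funcs := by
  exact enum_zip se
    (fun (s : PySem.Dict Int (List Int)) ep nxt =>
      if PySem.List.sorted
          (visited.filter (fun a => decide (ep ≤ a) && decide (a < nxt))) (fun x => x) false = []
      then s
      else s.insert ep (PySem.List.sorted
          (visited.filter (fun a => decide (ep ≤ a) && decide (a < nxt))) (fun x => x) false))
    BIN_END_VA se 0 funcs List.drop_zero.symm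

theorem build_functions_spec : Claim_equal_build_functions := by
  intro visited entries _
  show build_functions visited entries = build_functions_alt visited entries
  have hfeq : entries.filter (fun e => PySem.Set.contains (PySem.Set.ofList visited) e)
      = entries.filter (fun e => visited.contains e) :=
    List.filter_congr (fun e _ => by simp [PySem.Set.contains])
  have hA : build_functions visited entries
      = [] ++ canon (PySem.List.sorted visited (fun x => x) false) (PySem.List.sorted (PySem.Set.ofList (entries.filter (fun e => visited.contains e))) (fun x => x) false) :=
    (congrArg PySem.Dict.items (A_enum_eq_zip visited (PySem.List.sorted (entries.filter (fun e => visited.contains e)) (fun x => x) false) PySem.Dict.empty)).trans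
      (A_loop visited (PySem.List.sorted (entries.filter (fun e => visited.contains e)) (fun x => x) false) (PySem.List.sorted (PySem.Set.ofList (entries.filter (fun e => visited.contains e))) (fun x => x) false) PySem.Dict.empty
        (PySem.List.sorted_pairwise _ (fun x => x))
        (PySem.List.sorted_ofList_pairwise_lt _)
        (fun x => by rw [PySem.List.mem_sorted, PySem.List.mem_sorted, PySem.Set.mem_ofList])
        (fun k hk => by rw [dict_empty_contains] at hk; cases hk))
  have hB : build_functions_alt visited entries
      = [] ++ canon (PySem.List.sorted visited (fun x => x) false) (PySem.List.sorted (PySem.Set.ofList (entries.filter (fun e => visited.contains e))) (fun x => x) false) := by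
    simp only [build_functions_alt]
    rw [hfeq]
    exact B_loop (PySem.List.sorted visited (fun x => x) false) (PySem.List.sorted_pairwise _ (fun x => x)) (PySem.List.sorted (PySem.Set.ofList (entries.filter (fun e => visited.contains e))) (fun x => x) false)
      PySem.Dict.empty (PySem.List.sorted visited (fun x => x) false)
      (PySem.List.sorted_ofList_pairwise_lt _)
      (PySem.List.sorted_pairwise _ (fun x => x))
      (fun e _ => rfl)
      (fun k hk => by rw [dict_empty_contains] at hk; cases hk)
  exact hA.trans hB.symm
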